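-- pv_equiv track=rewrite | github.com/AlviereTheDerg/1999-script-generator | generate_text.py | collapse_vowel_stack
-- ===== SOURCE A (Python) =====
-- thin_consonants = {'m', 'n', 'h', 'l'}
--
-- def collapse_vowel_stack(base, vowel_stack: list):
--     unit_stack = []
--     while vowel_stack:
--         unit = [base, vowel_stack.pop()]
--         if base not in thin_consonants and vowel_stack:
--             unit.append(vowel_stack.pop())
--         unit_stack.append(unit[::-1])
--         base = 'h'
--     return unit_stack[::-1]
-- ===== SOURCE B (Python) =====
-- thin_consonants = {'m', 'n', 'h', 'l'}
--
-- def collapse_vowel_stack(base, vowel_stack: list):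
--     n = len(vowel_stack)
--     k = 0 if n == 0 else (2 if base not in thin_consonants and n >= 2 else 1)
--     result = [[v, 'h'] for v in vowel_stack[:n - k]]
--     if k:
--         result.append(vowel_stack[n - k:] + [base])
--     vowel_stack.clear()
--     return result
-- ===== Notes on version B (the rewrite author's own statement) =====
-- stated objective: simpler
-- what changed: Replaces the mutating pop-and-reverse while loop by computing k (how many vowels the base unit absorbs) and emitting the result in one forward slice/comprehension, then clearing the list to keep A's side effect.
import Mathlib
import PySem

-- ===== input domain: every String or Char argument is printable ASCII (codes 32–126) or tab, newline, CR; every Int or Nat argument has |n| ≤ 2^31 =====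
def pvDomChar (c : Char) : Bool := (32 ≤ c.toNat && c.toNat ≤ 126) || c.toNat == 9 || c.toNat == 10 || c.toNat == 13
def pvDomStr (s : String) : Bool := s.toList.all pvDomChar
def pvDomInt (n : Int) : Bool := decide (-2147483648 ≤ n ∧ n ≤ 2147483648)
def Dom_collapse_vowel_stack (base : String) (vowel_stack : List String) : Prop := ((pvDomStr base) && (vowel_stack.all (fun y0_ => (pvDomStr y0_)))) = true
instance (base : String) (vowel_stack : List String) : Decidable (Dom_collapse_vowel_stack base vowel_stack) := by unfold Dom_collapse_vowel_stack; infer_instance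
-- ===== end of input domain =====

-- B computes the partition of the vowel stack with one slice/comprehension instead of A's
-- mutating pop-and-reverse while loop (objective: simpler). Both Pythons empty vowel_stack
-- in place; the equivalence proved here is about the RETURN value only.

-- ===== PORT A =====
-- the module-level set thin_consonants = {'m','n','h','l'}
def thin_consonants : List String := ["m", "n", "h", "l"]

-- A's while loop: pop from the end of vs, possibly pop a second vowel, append unit[::-1],
-- continue with base = 'h'; acc is kept in append order and reversed on exit (unit_stack[::-1]).
def collapse_loop (base : String) (vs : List String) (acc : List (List String)) :
    List (List String) :=
  match h : vs.getLast? with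
  | none => acc.reverse
  | some v =>
    if base ∉ thin_consonants ∧ vs.dropLast ≠ [] then
      match vs.dropLast.getLast? with
      | some v2 =>
        collapse_loop "h" vs.dropLast.dropLast (acc ++ [[v2, v, base]])
      | none =>
        -- unreachable: vs.dropLast ≠ []
        collapse_loop "h" vs.dropLast (acc ++ [[v, base]])
    else
      collapse_loop "h" vs.dropLast (acc ++ [[v, base]])
  termination_by vs.length
  decreasing_by
    all_goals
      have hne : vs ≠ [] := by
        intro hnil; rw [hnil] at h; simp at h
      have hp : 0 < vs.length := List.length_pos_of_ne_nil hne
      simp [List.length_dropLast]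
      omega

def collapse_vowel_stack (base : String) (vowel_stack : List String) : List (List String) :=
  collapse_loop base vowel_stack []

-- ===== PORT B =====
def collapse_vowel_stack_alt (base : String) (vowel_stack : List String) : List (List String) :=
  let n := vowel_stack.length
  let k : Nat := if n = 0 then 0 else if base ∉ thin_consonants ∧ n ≥ 2 then 2 else 1
  let result := (vowel_stack.take (n - k)).map (fun v => [v, "h"])
  if k ≠ 0 then result ++ [vowel_stack.drop (n - k) ++ [base]] else result

-- ===== PRECONDITION & SPEC =====
def Spec_collapse_vowel_stack (base : String) (vowel_stack : List String) (out : List (List String)) : Prop := out = collapse_vowel_stack_alt base vowel_stack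
instance (base : String) (vowel_stack : List String) (out : List (List String)) : Decidable (Spec_collapse_vowel_stack base vowel_stack out) := by unfold Spec_collapse_vowel_stack; infer_instance

-- ===== CLAIM (what is proved, stated in full; the proofs are below) =====
def Claim_equal_collapse_vowel_stack : Prop := ∀ (base : String) (vowel_stack : List String), Dom_collapse_vowel_stack base vowel_stack → Spec_collapse_vowel_stack base vowel_stack (collapse_vowel_stack base vowel_stack)

-- ===== LEMMAS AND PROOFS =====

theorem collapse_loop_nil (base : String) (acc : List (List String)) :
    collapse_loop base [] acc = acc.reverse := by
  rw [collapse_loop]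
  rfl

theorem collapse_loop_concat (base : String) (xs : List String) (x : String)
    (acc : List (List String)) :
    collapse_loop base (xs ++ [x]) acc =
      if base ∉ thin_consonants ∧ xs ≠ [] then
        match xs.getLast? with
        | some v2 => collapse_loop "h" xs.dropLast (acc ++ [[v2, x, base]])
        | none => collapse_loop "h" xs (acc ++ [[x, base]])
      else collapse_loop "h" xs (acc ++ [[x, base]]) := by
  rw [collapse_loop]
  split
  · next hn => simp at hn
  · next v hv =>
      have hvx : x = v := by simpa using hv
      subst hvx
      simp

-- once base = 'h' (thin), each iteration takes exactly one vowel from the end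
theorem collapse_loop_h (vs : List String) (acc : List (List String)) :
    collapse_loop "h" vs acc = vs.map (fun v => [v, "h"]) ++ acc.reverse := by
  induction vs using List.reverseRecOn generalizing acc with
  | nil => simp [collapse_loop_nil]
  | append_singleton xs x ih =>
    rw [collapse_loop_concat]
    have : ¬ ("h" ∉ thin_consonants ∧ xs ≠ []) := by
      simp [thin_consonants]
    rw [if_neg this, ih]
    simp

-- ===== VERDICT (by name: the statement is the Claim_ definition above) =====
theorem collapse_vowel_stack_spec : Claim_equal_collapse_vowel_stack := by
  intro base vs _
  show collapse_vowel_stack base vs = collapse_vowel_stack_alt base vs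
  unfold collapse_vowel_stack collapse_vowel_stack_alt
  induction vs using List.reverseRecOn with
  | nil => simp [collapse_loop_nil]
  | append_singleton xs x _ =>
    rw [collapse_loop_concat]
    by_cases hb : base ∈ thin_consonants
    · -- thin base: the base unit takes one vowel
      rw [if_neg (by simp [hb]), collapse_loop_h]
      simp [hb]
    · cases hxs : xs.getLast? with
      | none =>
        have hx : xs = [] := List.getLast?_eq_none_iff.mp hxs
        subst hx
        rw [if_neg (by simp), collapse_loop_h]
        simp [hb]
      | some v2 =>
        have hne : xs ≠ [] := by
          intro h; rw [h] at hxs; simp at hxs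
        obtain ⟨ys, rfl⟩ : ∃ ys, xs = ys ++ [v2] := by
          rcases List.eq_nil_or_concat xs with h | ⟨ys, a, rfl⟩
          · exact absurd h hne
          · simp at hxs
            exact ⟨ys, by simp [hxs]⟩
        rw [if_pos ⟨hb, hne⟩]
        simp only [List.dropLast_concat]
        rw [collapse_loop_h]
        simp [hb]
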